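-- pv_equiv track=rewrite | github.com/mdflamingo/algorithms11 | 2hands/2hands_v2.py | play_2hands
-- ===== SOURCE A (Python) =====
-- def play_2hands(buttons, field):
--     score = 0
--     if not field:
--         return score
--
--     numbers = set(field)
--     for number in numbers:
--         count_buttons = field.count(number)
--         if count_buttons <= buttons:
--             score += 1
--     return score
-- ===== SOURCE B (Python) =====
-- def play_2hands(buttons, field):
--     score = 0
--     if not field:
--         return score
--
--     s = sorted(field)
--     i = 0
--     n = len(s)
--     while i < n:
--         j = i + 1
--         while j < n and s[j] == s[i]:
--             j += 1
--         if j - i <= buttons: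
--             score += 1
--         i = j
--     return score
-- ===== Notes on version B (the rewrite author's own statement) =====
-- stated objective: faster
-- what changed: Replaces A's set-then-field.count scan per distinct value with sort-then-run-length: sort a copy and make one pass counting maximal runs of equal values whose length is <= buttons.
import Mathlib
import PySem

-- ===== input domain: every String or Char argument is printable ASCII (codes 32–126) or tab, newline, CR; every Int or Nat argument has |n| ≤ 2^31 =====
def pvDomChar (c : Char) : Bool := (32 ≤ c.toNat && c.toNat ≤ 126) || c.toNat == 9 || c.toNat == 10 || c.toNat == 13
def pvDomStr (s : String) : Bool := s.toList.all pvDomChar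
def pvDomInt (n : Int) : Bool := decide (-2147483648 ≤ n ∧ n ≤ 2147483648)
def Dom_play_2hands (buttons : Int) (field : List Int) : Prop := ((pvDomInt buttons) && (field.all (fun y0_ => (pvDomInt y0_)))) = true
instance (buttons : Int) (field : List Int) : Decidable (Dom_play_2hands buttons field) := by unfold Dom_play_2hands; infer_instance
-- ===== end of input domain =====

-- B replaces A's per-distinct-value field.count scan with sort + one run-length pass (objective: faster).

-- ===== PORT A =====
def play_2hands (buttons : Int) (field : List Int) : Int :=
  let score : Int := 0
  if field = [] then score
  else
    let numbers : PySem.Set Int := PySem.Set.ofList field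
    numbers.foldl (fun score number =>
      let count_buttons : Int := PySem.List.count field number
      if count_buttons ≤ buttons then score + 1 else score) score

-- ===== PORT B =====
-- run-length scan over a sorted copy: each maximal run of equal values is one
-- distinct value, its length is that value's multiplicity (Source B's inner while = takeWhile)
def runScan (buttons : Int) : List Int → Int
  | [] => 0
  | x :: rest =>
      let run := rest.takeWhile (fun y => y == x)
      let tail := rest.dropWhile (fun y => y == x)
      (if (1 + (run.length : Int)) ≤ buttons then 1 else 0) + runScan buttons tail
  termination_by l => l.length
  decreasing_by
    simpa using Nat.lt_succ_of_le (List.dropWhile_sublist (fun y => y == x) (l := rest)).length_le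

def play_2hands_alt (buttons : Int) (field : List Int) : Int :=
  let score : Int := 0
  if field = [] then score
  else runScan buttons (PySem.List.sorted field (fun x => x) false)

-- ===== PRECONDITION & SPEC =====
def Spec_play_2hands (buttons : Int) (field : List Int) (out : Int) : Prop := out = play_2hands_alt buttons field
instance (buttons : Int) (field : List Int) (out : Int) : Decidable (Spec_play_2hands buttons field out) := by unfold Spec_play_2hands; infer_instance

-- ===== CLAIM (what is proved, stated in full; the proofs are below) =====
def Claim_equal_play_2hands : Prop := ∀ (buttons : Int) (field : List Int), Dom_play_2hands buttons field → Spec_play_2hands buttons field (play_2hands buttons field)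

-- ===== LEMMAS AND PROOFS =====

lemma foldl_add_cons (x : Int) (acc tail : List Int) (h : ∀ y ∈ tail, y ≠ x) :
    tail.foldl PySem.Set.add (x :: acc) = x :: tail.foldl PySem.Set.add acc := by
  induction tail generalizing acc with
  | nil => rfl
  | cons a t ih =>
    have hax : a ≠ x := h a (List.mem_cons_self ..)
    have h' : ∀ y ∈ t, y ≠ x := fun y hy => h y (List.mem_cons_of_mem _ hy)
    by_cases hm : a ∈ acc
    · have e1 : PySem.Set.add (x :: acc) a = x :: acc := by
        simp [PySem.Set.add, PySem.Set.contains, hm]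
      have e2 : PySem.Set.add acc a = acc := by
        simp [PySem.Set.add, PySem.Set.contains, hm]
      rw [List.foldl_cons, List.foldl_cons, e1, e2]; exact ih _ h'
    · have e1 : PySem.Set.add (x :: acc) a = x :: (acc ++ [a]) := by
        simp [PySem.Set.add, PySem.Set.contains, hm, hax]
      have e2 : PySem.Set.add acc a = acc ++ [a] := by
        simp [PySem.Set.add, PySem.Set.contains, hm]
      rw [List.foldl_cons, List.foldl_cons, e1, e2]; exact ih _ h'

lemma ofList_run (x : Int) (run tail : List Int) (hrun : ∀ y ∈ run, y = x)
    (htail : ∀ z ∈ tail, z ≠ x) :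
    PySem.Set.ofList (x :: run ++ tail) = x :: PySem.Set.ofList tail := by
  have hstep : run.foldl PySem.Set.add [x] = [x] := by
    induction run with
    | nil => rfl
    | cons a r ih =>
      have ha : a = x := hrun a (List.mem_cons_self ..)
      simp only [List.foldl_cons, PySem.Set.add, PySem.Set.contains, ha]
      simp only [List.contains_cons, beq_self_eq_true, Bool.true_or, if_true]
      exact ih (fun y hy => hrun y (List.mem_cons_of_mem _ hy))
  have : PySem.Set.ofList (x :: run ++ tail) = tail.foldl PySem.Set.add (run.foldl PySem.Set.add [x]) := by
    simp [PySem.Set.ofList_eq_foldl, PySem.Set.add, PySem.Set.contains, List.foldl_append]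
  rw [this, hstep, foldl_add_cons x [] tail htail, PySem.Set.ofList_eq_foldl]

lemma dropWhile_ne (x : Int) (rest : List Int) (hp : rest.Pairwise (· ≤ ·))
    (hx : ∀ y ∈ rest, x ≤ y) :
    ∀ z ∈ rest.dropWhile (fun y => y == x), z ≠ x := by
  induction rest with
  | nil => simp
  | cons a r ih =>
    by_cases ha : a = x
    · simp only [List.dropWhile_cons, ha, beq_self_eq_true, if_true]
      exact ih (List.Pairwise.of_cons hp) (fun y hy => hx y (List.mem_cons_of_mem _ hy))
    · simp only [List.dropWhile_cons, beq_iff_eq, ha, if_false]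
      intro z hz
      have hxa : x < a := lt_of_le_of_ne (hx a (List.mem_cons_self ..)) (Ne.symm ha)
      rcases List.mem_cons.mp hz with rfl | hzr
      · exact ha
      · have : a ≤ z := (List.pairwise_cons.mp hp).1 z hzr
        omega

lemma runScan_eq (buttons : Int) (l : List Int) (hs : l.Pairwise (· ≤ ·)) :
    runScan buttons l =
      ((PySem.Set.ofList l).countP (fun k => decide ((l.count k : Int) ≤ buttons)) : Int) := by
  fun_induction runScan buttons l with
  | case1 => rfl
  | case2 x rest run tail ih =>
    have hx : ∀ y ∈ rest, x ≤ y := (List.pairwise_cons.mp hs).1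
    have hp : rest.Pairwise (· ≤ ·) := (List.pairwise_cons.mp hs).2
    have hrun : ∀ y ∈ run, y = x := fun y hy => by
      simpa using List.mem_takeWhile_imp (p := fun y => y == x) hy
    have htail : ∀ z ∈ tail, z ≠ x := dropWhile_ne x rest hp hx
    have hsplit : x :: rest = x :: run ++ tail := by
      simp [run, tail, List.takeWhile_append_dropWhile]
    have htailp : tail.Pairwise (· ≤ ·) :=
      hp.sublist (List.dropWhile_sublist (fun y => y == x))
    -- count of x in the whole list is 1 + run.length
    have hcx : (x :: rest).count x = run.length + 1 := by
      rw [hsplit]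
      have h1 : run.count x = run.length :=
        List.count_eq_length.mpr (fun y hy => by rw [hrun y hy])
      have h2 : tail.count x = 0 :=
        List.count_eq_zero.mpr (fun hmem => htail x hmem rfl)
      simp [List.count_append, h1, h2]
    -- counts of other values agree with tail
    have hck : ∀ k ∈ tail, (x :: rest).count k = tail.count k := by
      intro k hk
      have hkx : k ≠ x := htail k hk
      have hkr : k ∉ run := fun hmem => hkx (hrun k hmem)
      rw [hsplit]
      simp [List.count_append, Ne.symm hkx,
        List.count_eq_zero.mpr hkr]
    rw [hsplit, ofList_run x run tail hrun htail, ← hsplit, List.countP_cons]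
    have hcongr :
        (PySem.Set.ofList tail).countP (fun k => decide (((x :: rest).count k : Int) ≤ buttons))
          = (PySem.Set.ofList tail).countP (fun k => decide ((tail.count k : Int) ≤ buttons)) := by
      apply List.countP_congr
      intro k hk
      have : k ∈ tail := (PySem.Set.mem_ofList _ _).mp hk
      simp [hck k this]
    rw [hcongr, hcx]
    have hif : (if (1 + (run.length : Int)) ≤ buttons then (1:Int) else 0)
        = ((if decide (((run.length + 1 : Nat) : Int) ≤ buttons) = true then 1 else 0 : Nat) : Int) := by
      push_cast
      split_ifs with h1 h2 h2 <;> simp_all <;> omega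
    rw [ih htailp]
    push_cast
    rw [hif]
    push_cast
    ring

lemma play_2hands_eq (buttons : Int) (field : List Int) :
    play_2hands buttons field = play_2hands_alt buttons field := by
  unfold play_2hands play_2hands_alt
  by_cases hf : field = []
  · simp [hf]
  · simp only [hf, if_false]
    have hA : (PySem.Set.ofList field).foldl (fun score number =>
        if PySem.List.count field number ≤ buttons then score + 1 else score) (0:Int)
        = 0 + (((PySem.Set.ofList field).countP
            (fun k => decide ((field.count k : Int) ≤ buttons)) : Nat) : Int) := by
      rw [PySem.List.foldl_ite_add_one]
      simp only [PySem.List.count_eq]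
      norm_num
      exact List.countP_congr (fun a _ => by simp)
    rw [hA]
    have hsorted : (PySem.List.sorted field (fun x => x) false).Pairwise (· ≤ ·) :=
      PySem.List.sorted_pairwise field (fun x => x)
    rw [runScan_eq buttons _ hsorted]
    have hperm : (PySem.List.sorted field (fun x => x) false).Perm field :=
      PySem.List.sorted_perm field (fun x => x) false
    have hsetperm : (PySem.Set.ofList (PySem.List.sorted field (fun x => x) false)).Perm
        (PySem.Set.ofList field) := by
      rw [List.perm_ext_iff_of_nodup (PySem.Set.nodup_ofList _) (PySem.Set.nodup_ofList _)]
      intro a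
      simp [PySem.Set.mem_ofList, hperm.mem_iff]
    have hcount : ∀ k, (PySem.List.sorted field (fun x => x) false).count k = field.count k :=
      fun k => hperm.count_eq k
    have h1 : (PySem.Set.ofList (PySem.List.sorted field (fun x => x) false)).countP
        (fun k => decide (((PySem.List.sorted field (fun x => x) false).count k : Int) ≤ buttons))
        = (PySem.Set.ofList (PySem.List.sorted field (fun x => x) false)).countP
            (fun k => decide ((field.count k : Int) ≤ buttons)) :=
      List.countP_congr (fun k _ => by simp [hcount k])
    have h2 : (PySem.Set.ofList (PySem.List.sorted field (fun x => x) false)).countP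
        (fun k => decide ((field.count k : Int) ≤ buttons))
        = (PySem.Set.ofList field).countP (fun k => decide ((field.count k : Int) ≤ buttons)) :=
      hsetperm.countP_eq _
    rw [h1, h2]
    omega

-- ===== VERDICT (by name: the statement is the Claim_ definition above) =====
theorem play_2hands_spec : Claim_equal_play_2hands := by
  intro buttons field _
  exact play_2hands_eq buttons field
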